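-- pv_equiv track=rewrite | github.com/qtangcpu/Leetcode_Practice | main.py | max_traverse
-- ===== SOURCE A (Python) =====
-- def traverse_matrix(matrix):
--
--     rows, cols = len(matrix), len(matrix[0])
--
--     # Initialize the matrix of point values and the optimal score matrix
--     optimal_score = [[0 for j in range(cols)] for i in range(rows)]
--     optimal_score[0][0] = matrix[0][0]  # Initialize first row
--
--     for i in range(1, rows):
--         optimal_score[i][0] = optimal_score[i-1][0] + matrix[i][0]  # Initialize first column
--
--     for j in range(1, cols):
--         optimal_score[0][j] = optimal_score[0][j-1] + matrix[0][j]
--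
--     # Compute the optimal score for each cell
--     for i in range(1, rows):
--         for j in range(1, cols):
--             optimal_score[i][j] = max(optimal_score[i-1][j], optimal_score[i][j-1]) + matrix[i][j]
--
--     path = []
--     distance = rows + cols - 2
--
--     a = rows-1
--     b = cols-1
--     while a != 0 or b != 0:
--         if a >= 1 and b >= 1:
--             if optimal_score[a-1][b] > optimal_score[a][b-1]:
--                 path.append("d")
--                 a -= 1
--             else:
--                 path.append("r")
--                 b -= 1
--         elif a==0:
--             path.append("r")
--             b -= 1
--         elif b==0:
--             path.append("d")
--             a -= 1
--
--     return [optimal_score[rows - 1][cols - 1], path]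
--
-- def max_traverse(matrix):
--     rows, cols = len(matrix), len(matrix[0])
--     matrix1 = [[matrix[i][j] for j in range(cols//2 + 1)] for i in range(rows//2+1)]
--     traverse1 = traverse_matrix(matrix1)
--     point1 = traverse1[0]
--     path1 = traverse1[1]
--     matrix2 = [[matrix[i][cols//2-j] for j in range(cols // 2 + 1)] for i in range(rows // 2+1)]
--     traverse2 = traverse_matrix(matrix2)
--     point2 = traverse2[0]
--     path2 = traverse2[1]
--     for i in range(len(path2)):
--         if path2[i] == "r":
--             path2[i] = "l"
--     matrix3 = [[matrix[rows//2-i][cols//2-j] for j in range(cols // 2 + 1)] for i in range(rows // 2+1)]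
--     traverse3 = traverse_matrix(matrix3)
--     point3 = traverse3[0]
--     path3 = traverse3[1]
--     for i in range(len(path3)):
--         if path3[i] == "r":
--             path3[i] = "l"
--         if path3[i] == "d":
--             path3[i] = "u"
--     matrix4 = [[matrix[rows // 2 - i][j] for j in range(cols // 2 + 1)] for i in range(rows // 2+1)]
--     traverse4 = traverse_matrix(matrix4)
--     point4 = traverse4[0]
--     path4 = traverse4[1]
--     for i in range(len(path4)):
--         if path4[i] == "d":
--             path4[i] = "u"
--
--     max_point = max(point1, point2, point3, point4)
--     if max_point == point1:
--         return path1
--     elif max_point == point2: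
--         return path2
--     elif max_point == point3:
--         return path3
--     elif max_point == point4:
--         return path4
-- ===== SOURCE B (Python) =====
-- def _best_path(m, dname, rname):
--     # single forward pass over rows; every cell carries (score, its full reversed
--     # path already in final labels), so no direction table and no backward walk
--     row = [(m[0][0], [])]
--     for j in range(1, len(m[0])):
--         s, p = row[-1]
--         row.append((s + m[0][j], [rname] + p))
--     for i in range(1, len(m)):
--         s, p = row[0]
--         new = [(s + m[i][0], [dname] + p)]
--         for j in range(1, len(m[0])):
--             us, up = row[j]
--             ls, lp = new[-1]
--             if us > ls:
--                 new.append((us + m[i][j], [dname] + up))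
--             else:
--                 new.append((ls + m[i][j], [rname] + lp))
--         row = new
--     return row[-1]
--
--
-- def max_traverse(matrix):
--     rows, cols = len(matrix), len(matrix[0])
--     ri, ci = rows // 2, cols // 2
--     results = []
--     for si, sj, dn, rn in ((1, 1, "d", "r"), (1, -1, "d", "l"),
--                            (-1, -1, "u", "l"), (-1, 1, "u", "r")):
--         sub = [[matrix[i if si == 1 else ri - i][j if sj == 1 else ci - j]
--                 for j in range(ci + 1)] for i in range(ri + 1)]
--         results.append(_best_path(sub, dn, rn))
--     best = results[0]
--     for r in results[1:]:
--         if r[0] > best[0]: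
--             best = r
--     return best[1]
-- ===== Notes on version B (the rewrite author's own statement) =====
-- stated objective: alternative
-- what changed: B's quadrant solver does a single forward pass in which every cell carries the pair (score, its complete reversed path already written in that quadrant's final labels), so A's full score matrix, its separate backward score-comparing walk, and its relabelling map passes all disappear; the four-quadrant driver becomes one loop over (sign, label) tuples with a running strict-max selection instead of four pasted blocks and a max-then-first-equal chain.
import Mathlib
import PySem

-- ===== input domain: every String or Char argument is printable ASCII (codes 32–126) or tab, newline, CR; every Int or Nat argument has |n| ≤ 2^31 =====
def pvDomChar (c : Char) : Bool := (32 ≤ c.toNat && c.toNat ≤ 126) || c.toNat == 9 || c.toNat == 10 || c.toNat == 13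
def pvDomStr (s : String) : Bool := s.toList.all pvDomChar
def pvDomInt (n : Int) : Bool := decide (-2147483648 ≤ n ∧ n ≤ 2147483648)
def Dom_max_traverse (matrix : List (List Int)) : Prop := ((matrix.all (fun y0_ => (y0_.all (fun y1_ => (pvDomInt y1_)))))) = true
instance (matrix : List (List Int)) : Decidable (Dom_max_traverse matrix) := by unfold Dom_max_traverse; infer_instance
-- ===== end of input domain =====

-- B replaces A's score matrix + backward re-comparison walk + relabel passes by one forward pass
-- whose cells carry (score, reversed path already in final labels) (objective: alternative; not faster).

-- the nested list comprehension [[f i j for j in range(cols)] for i in range(rows)] (shared notation for both ports)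
def pvEtab (rows cols : Nat) (f : Nat → Nat → Int) : List (List Int) :=
  (List.range rows).map (fun i => (List.range cols).map (fun j => f i j))

-- ===== PORT A =====
-- matrix[i][j] for indices that Python A only uses in range (Pre_ excludes the raising inputs)
def pvMget (m : List (List Int)) (i j : Nat) : Int := (m.getD i []).getD j 0

-- optimal_score[i][j] = v  (in-place update of the nested list)
def pvSet2 (t : List (List Int)) (i j : Nat) (v : Int) : List (List Int) :=
  t.set i ((t.getD i []).set j v)

-- the backward 'while a != 0 or b != 0' walk of traverse_matrix
def pvWalkA (os : List (List Int)) (a b : Nat) (path : List String) : List String :=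
  if a = 0 ∧ b = 0 then path
  else if 1 ≤ a ∧ 1 ≤ b then
    if pvMget os (a-1) b > pvMget os a (b-1) then pvWalkA os (a-1) b (path ++ ["d"])
    else pvWalkA os a (b-1) (path ++ ["r"])
  else if a = 0 then pvWalkA os a (b-1) (path ++ ["r"])
  else pvWalkA os (a-1) b (path ++ ["d"])
termination_by a + b
decreasing_by all_goals omega

-- Python's range(1, n) over nonnegative loop indices is ported as List.range' 1 (n-1)
def pvTraverseMatrix (matrix : List (List Int)) : Int × List String :=
  let rows := matrix.length
  let cols := (matrix.getD 0 []).length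
  let os := pvEtab rows cols (fun _ _ => (0:Int))
  let os := pvSet2 os 0 0 (pvMget matrix 0 0)
  let os := (List.range' 1 (rows-1)).foldl
    (fun os i => pvSet2 os i 0 (pvMget os (i-1) 0 + pvMget matrix i 0)) os
  let os := (List.range' 1 (cols-1)).foldl
    (fun os j => pvSet2 os 0 j (pvMget os 0 (j-1) + pvMget matrix 0 j)) os
  let os := (List.range' 1 (rows-1)).foldl
    (fun os i => (List.range' 1 (cols-1)).foldl
      (fun os j => pvSet2 os i j (max (pvMget os (i-1) j) (pvMget os i (j-1)) + pvMget matrix i j)) os) os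
  (pvMget os (rows-1) (cols-1), pvWalkA os (rows-1) (cols-1) [])

def max_traverse (matrix : List (List Int)) : List String :=
  let rows := matrix.length
  let cols := (matrix.getD 0 []).length
  let t1 := pvTraverseMatrix (pvEtab (rows/2+1) (cols/2+1) (fun i j => pvMget matrix i j))
  let t2 := pvTraverseMatrix (pvEtab (rows/2+1) (cols/2+1) (fun i j => pvMget matrix i (cols/2-j)))
  let path2 := t2.2.map (fun s => if s = "r" then "l" else s)
  let t3 := pvTraverseMatrix (pvEtab (rows/2+1) (cols/2+1) (fun i j => pvMget matrix (rows/2-i) (cols/2-j)))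
  let path3 := t3.2.map (fun s => let s := if s = "r" then "l" else s; if s = "d" then "u" else s)
  let t4 := pvTraverseMatrix (pvEtab (rows/2+1) (cols/2+1) (fun i j => pvMget matrix (rows/2-i) j))
  let path4 := t4.2.map (fun s => if s = "d" then "u" else s)
  let mx := max t1.1 (max t2.1 (max t3.1 t4.1))
  if mx = t1.1 then t1.2
  else if mx = t2.1 then path2
  else if mx = t3.1 then path3
  else if mx = t4.1 then path4
  else []  -- unreachable: mx is one of the four scores (Python would return None here)

-- ===== PORT B =====
-- first row of B's pass: pairs (score, reversed path), '[rname] + p' is a cons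
def pvBFirstRow (m : List (List Int)) (rn : String) (cols : Nat) : List (Int × List String) :=
  (List.range' 1 (cols-1)).foldl
    (fun r j => r ++ [((r.getLastD (0, [])).1 + pvMget m 0 j, rn :: (r.getLastD (0, [])).2)])
    [(pvMget m 0 0, [])]

-- one row of B's pass from the previous row
def pvBRowStep (m : List (List Int)) (dn rn : String) (row : List (Int × List String)) (i cols : Nat) :
    List (Int × List String) :=
  (List.range' 1 (cols-1)).foldl
    (fun nw j =>
      if (row.getD j (0, [])).1 > (nw.getLastD (0, [])).1 then
        nw ++ [((row.getD j (0, [])).1 + pvMget m i j, dn :: (row.getD j (0, [])).2)]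
      else
        nw ++ [((nw.getLastD (0, [])).1 + pvMget m i j, rn :: (nw.getLastD (0, [])).2)])
    [((row.getD 0 (0, [])).1 + pvMget m i 0, dn :: (row.getD 0 (0, [])).2)]

def pvBestPath (m : List (List Int)) (dn rn : String) : Int × List String :=
  let rows := m.length
  let cols := (m.getD 0 []).length
  let row := (List.range' 1 (rows-1)).foldl
    (fun row i => pvBRowStep m dn rn row i cols) (pvBFirstRow m rn cols)
  row.getLastD (0, [])

def max_traverse_alt (matrix : List (List Int)) : List String :=
  let rows := matrix.length
  let cols := (matrix.getD 0 []).length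
  let ri := rows/2
  let ci := cols/2
  let quads : List (Int × Int × String × String) :=
    [(1,1,"d","r"), (1,-1,"d","l"), (-1,-1,"u","l"), (-1,1,"u","r")]
  let results := quads.foldl
    (fun (acc : List (Int × List String)) q =>
      acc ++ [pvBestPath
        (pvEtab (ri+1) (ci+1) (fun i j =>
          pvMget matrix (if q.1 = 1 then i else ri - i) (if q.2.1 = 1 then j else ci - j)))
        q.2.2.1 q.2.2.2])
    []
  let best := (results.drop 1).foldl (fun best r => if r.1 > best.1 then r else best) (results.headD (0, []))
  best.2

-- ===== PRECONDITION & SPEC =====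
-- Pre_ excludes exactly the inputs where Python A raises IndexError: the empty matrix,
-- an empty first row, or a row among the first rows//2+1 shorter than cols//2+1.
def Pre_max_traverse (matrix : List (List Int)) : Prop :=
  0 < matrix.length ∧ 0 < (matrix.getD 0 []).length ∧
  ∀ i < matrix.length / 2 + 1, (matrix.getD 0 []).length / 2 + 1 ≤ (matrix.getD i []).length
instance (matrix : List (List Int)) : Decidable (Pre_max_traverse matrix) := by
  unfold Pre_max_traverse; infer_instance

def pvWitness_max_traverse : List (List Int) := [[1, 2], [3, 4]]

def Spec_max_traverse (matrix : List (List Int)) (out : List String) : Prop := out = max_traverse_alt matrix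
instance (matrix : List (List Int)) (out : List String) : Decidable (Spec_max_traverse matrix out) := by unfold Spec_max_traverse; infer_instance

-- ===== CLAIM (what is proved, stated in full; the proofs are below) =====
def Claim_equal_max_traverse : Prop := ∀ (matrix : List (List Int)), Dom_max_traverse matrix → Pre_max_traverse matrix → Spec_max_traverse matrix (max_traverse matrix)

-- ===== LEMMAS AND PROOFS =====

theorem pvEtab_congr {rows cols : Nat} {f g : Nat → Nat → Int}
    (h : ∀ i < rows, ∀ j < cols, f i j = g i j) : pvEtab rows cols f = pvEtab rows cols g := by
  unfold pvEtab
  refine List.map_congr_left (fun i hi => ?_)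
  refine List.map_congr_left (fun j hj => ?_)
  exact h i (List.mem_range.1 hi) j (List.mem_range.1 hj)

theorem pvGetRow_Etab {rows cols : Nat} (f : Nat → Nat → Int) {i : Nat} (hi : i < rows) :
    (pvEtab rows cols f).getD i [] = (List.range cols).map (fun j => f i j) := by
  unfold pvEtab
  rw [List.getD_eq_getElem _ _ (by simpa using hi)]
  simp

theorem pvMget_Etab {rows cols : Nat} (f : Nat → Nat → Int) {i j : Nat}
    (hi : i < rows) (hj : j < cols) : pvMget (pvEtab rows cols f) i j = f i j := by
  unfold pvMget
  rw [pvGetRow_Etab f hi, List.getD_eq_getElem _ _ (by simpa using hj)]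
  simp

theorem map_range_set {α : Type} (n : Nat) (g : Nat → α) (i : Nat) (x : α) (_hi : i < n) :
    ((List.range n).map g).set i x = (List.range n).map (fun a => if a = i then x else g a) := by
  refine List.ext_getElem (by simp) (fun k h1 h2 => ?_)
  simp only [List.getElem_set, List.getElem_map, List.getElem_range] at *
  by_cases hk : i = k
  · simp [hk]
  · rw [if_neg hk, if_neg (fun h => hk h.symm)]

theorem pvSet2_Etab {rows cols : Nat} (f : Nat → Nat → Int) {i j : Nat} (v : Int)
    (hi : i < rows) (hj : j < cols) :
    pvSet2 (pvEtab rows cols f) i j v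
      = pvEtab rows cols (fun a b => if a = i ∧ b = j then v else f a b) := by
  unfold pvSet2
  rw [pvGetRow_Etab f hi, map_range_set _ _ _ _ hj]
  show (pvEtab rows cols f).set i _ = _
  unfold pvEtab
  rw [map_range_set _ _ _ _ hi]
  refine List.map_congr_left (fun a ha => ?_)
  by_cases hai : a = i
  · subst hai
    rw [if_pos rfl]
    refine List.map_congr_left (fun b hb => ?_)
    by_cases hbj : b = j <;> simp [hbj]
  · simp only [if_neg hai]
    refine List.map_congr_left (fun b hb => ?_)
    simp [hai]

def pvOpt (m : List (List Int)) : Nat → Nat → Int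
  | 0, 0 => pvMget m 0 0
  | i+1, 0 => pvOpt m i 0 + pvMget m (i+1) 0
  | 0, j+1 => pvOpt m 0 j + pvMget m 0 (j+1)
  | i+1, j+1 => max (pvOpt m i (j+1)) (pvOpt m (i+1) j) + pvMget m (i+1) (j+1)

theorem pvColPhase (m : List (List Int)) (R C : Nat) (k : Nat) (hk : k ≤ R) :
    (List.range' 1 k).foldl (fun os i => pvSet2 os i 0 (pvMget os (i-1) 0 + pvMget m i 0))
      (pvEtab (R+1) (C+1) (fun a b => if a = 0 ∧ b = 0 then pvMget m 0 0 else 0))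
    = pvEtab (R+1) (C+1) (fun a b => if b = 0 ∧ a ≤ k then pvOpt m a 0 else 0) := by
  induction k with
  | zero =>
    simp only [List.range', List.foldl_nil]
    apply pvEtab_congr; intro a ha b hb
    by_cases h1 : a = 0 ∧ b = 0
    · obtain ⟨rfl, rfl⟩ := h1; simp [pvOpt]
    · rw [if_neg h1, if_neg (by omega)]
  | succ k ih =>
    rw [List.range'_1_concat, List.foldl_append, ih (by omega)]
    simp only [List.foldl_cons, List.foldl_nil, Nat.add_sub_cancel_left]
    rw [pvMget_Etab _ (by omega) (by omega)]
    rw [pvSet2_Etab _ _ (by omega) (by omega)]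
    apply pvEtab_congr; intro a ha b hb
    by_cases h1 : a = 1 + k ∧ b = 0
    · obtain ⟨rfl, rfl⟩ := h1
      rw [if_pos ⟨rfl, rfl⟩, if_pos (by omega)]
      rw [if_pos (by omega)]
      have : 1 + k = k + 1 := by omega
      rw [this, pvOpt]
    · rw [if_neg h1]
      by_cases h2 : b = 0 ∧ a ≤ k
      · rw [if_pos h2, if_pos (by omega)]
      · rw [if_neg h2, if_neg (by omega)]

theorem pvRowPhase (m : List (List Int)) (R C : Nat) (k : Nat) (hk : k ≤ C) :
    (List.range' 1 k).foldl (fun os j => pvSet2 os 0 j (pvMget os 0 (j-1) + pvMget m 0 j))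
      (pvEtab (R+1) (C+1) (fun a b => if b = 0 then pvOpt m a 0 else 0))
    = pvEtab (R+1) (C+1) (fun a b =>
        if b = 0 then pvOpt m a 0 else if a = 0 ∧ b ≤ k then pvOpt m 0 b else 0) := by
  induction k with
  | zero =>
    simp only [List.range', List.foldl_nil]
    apply pvEtab_congr; intro a ha b hb
    by_cases h1 : b = 0
    · simp [h1]
    · rw [if_neg h1, if_neg h1, if_neg (by omega)]
  | succ k ih =>
    rw [List.range'_1_concat, List.foldl_append, ih (by omega)]
    simp only [List.foldl_cons, List.foldl_nil, Nat.add_sub_cancel_left]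
    rw [pvMget_Etab _ (by omega) (by omega)]
    rw [pvSet2_Etab _ _ (by omega) (by omega)]
    have hread : (if k = 0 then pvOpt m 0 0 else if 0 = 0 ∧ k ≤ k then pvOpt m 0 k else 0)
        = pvOpt m 0 k := by
      by_cases hk0 : k = 0
      · subst hk0; simp
      · rw [if_neg hk0, if_pos ⟨rfl, le_refl k⟩]
    rw [hread]
    apply pvEtab_congr; intro a ha b hb
    by_cases h1 : a = 0 ∧ b = 1 + k
    · obtain ⟨rfl, rfl⟩ := h1
      rw [if_pos ⟨rfl, rfl⟩, if_neg (by omega), if_pos (by omega)]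
      have : 1 + k = k + 1 := by omega
      rw [this, pvOpt]
    · rw [if_neg h1]
      by_cases h2 : b = 0
      · simp [h2]
      · rw [if_neg h2, if_neg h2]
        by_cases h3 : a = 0 ∧ b ≤ k
        · rw [if_pos h3, if_pos (by omega)]
        · rw [if_neg h3, if_neg (by omega)]

theorem pvMainInner (m : List (List Int)) (R C i : Nat) (hi1 : 1 ≤ i) (hiR : i ≤ R)
    (t : Nat) (ht : t ≤ C) :
    (List.range' 1 t).foldl
      (fun os j => pvSet2 os i j (max (pvMget os (i-1) j) (pvMget os i (j-1)) + pvMget m i j))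
      (pvEtab (R+1) (C+1) (fun a b => if a < i ∨ b = 0 then pvOpt m a b else 0))
    = pvEtab (R+1) (C+1) (fun a b =>
        if a < i ∨ b = 0 ∨ (a = i ∧ b ≤ t) then pvOpt m a b else 0) := by
  obtain ⟨i', rfl⟩ : ∃ i', i = i' + 1 := ⟨i - 1, by omega⟩
  induction t with
  | zero =>
    simp only [List.range', List.foldl_nil]
    apply pvEtab_congr; intro a ha b hb
    by_cases h1 : a < i' + 1 ∨ b = 0
    · rw [if_pos h1, if_pos (by omega)]
    · rw [if_neg h1, if_neg (by omega)]
  | succ t ih =>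
    rw [List.range'_1_concat, List.foldl_append, ih (by omega)]
    simp only [List.foldl_cons, List.foldl_nil, Nat.add_sub_cancel_left, Nat.add_sub_cancel]
    rw [pvMget_Etab _ (by omega) (by omega), pvMget_Etab _ (by omega) (by omega)]
    rw [pvSet2_Etab _ _ (by omega) (by omega)]
    have hup : (if i' < i' + 1 ∨ 1 + t = 0 ∨ (i' = i' + 1 ∧ 1 + t ≤ t)
        then pvOpt m i' (1 + t) else 0) = pvOpt m i' (1 + t) := by
      rw [if_pos (by omega)]
    have hleft : (if i' + 1 < i' + 1 ∨ t = 0 ∨ (i' + 1 = i' + 1 ∧ t ≤ t)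
        then pvOpt m (i' + 1) t else 0) = pvOpt m (i' + 1) t := by
      rw [if_pos (by omega)]
    rw [hup, hleft]
    apply pvEtab_congr; intro a ha b hb
    by_cases h1 : a = i' + 1 ∧ b = 1 + t
    · obtain ⟨rfl, rfl⟩ := h1
      rw [if_pos ⟨rfl, rfl⟩, if_pos (by omega)]
      have : 1 + t = t + 1 := by omega
      rw [this, pvOpt]
    · rw [if_neg h1]
      by_cases h2 : a < i' + 1 ∨ b = 0 ∨ (a = i' + 1 ∧ b ≤ t)
      · rw [if_pos h2, if_pos (by omega)]
      · rw [if_neg h2, if_neg (by omega)]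

theorem pvMainPhase (m : List (List Int)) (R C : Nat) (k : Nat) (hk : k ≤ R) :
    (List.range' 1 k).foldl
      (fun os i => (List.range' 1 C).foldl
        (fun os j => pvSet2 os i j (max (pvMget os (i-1) j) (pvMget os i (j-1)) + pvMget m i j)) os)
      (pvEtab (R+1) (C+1) (fun a b => if a = 0 ∨ b = 0 then pvOpt m a b else 0))
    = pvEtab (R+1) (C+1) (fun a b => if a ≤ k ∨ b = 0 then pvOpt m a b else 0) := by
  induction k with
  | zero =>
    simp only [List.range', List.foldl_nil]
    apply pvEtab_congr; intro a ha b hb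
    by_cases h1 : a = 0 ∨ b = 0
    · rw [if_pos h1, if_pos (by omega)]
    · rw [if_neg h1, if_neg (by omega)]
  | succ k ih =>
    rw [List.range'_1_concat, List.foldl_append, ih (by omega)]
    simp only [List.foldl_cons, List.foldl_nil]
    have hbase : pvEtab (R+1) (C+1) (fun a b => if a ≤ k ∨ b = 0 then pvOpt m a b else 0)
        = pvEtab (R+1) (C+1) (fun a b => if a < 1 + k ∨ b = 0 then pvOpt m a b else 0) := by
      apply pvEtab_congr; intro a ha b hb
      by_cases h1 : a ≤ k ∨ b = 0
      · rw [if_pos h1, if_pos (by omega)]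
      · rw [if_neg h1, if_neg (by omega)]
    rw [hbase, pvMainInner m R C (1+k) (by omega) (by omega) C (le_refl C)]
    apply pvEtab_congr; intro a ha b hb
    by_cases h1 : a < 1 + k ∨ b = 0 ∨ (a = 1 + k ∧ b ≤ C)
    · rw [if_pos h1, if_pos (by omega)]
    · rw [if_neg h1, if_neg (by omega)]

theorem pvAtable (mm : List (List Int)) (R C : Nat) :
    ((List.range' 1 R).foldl
      (fun os i => (List.range' 1 C).foldl
        (fun os j => pvSet2 os i j (max (pvMget os (i-1) j) (pvMget os i (j-1)) + pvMget mm i j)) os)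
      ((List.range' 1 C).foldl
        (fun os j => pvSet2 os 0 j (pvMget os 0 (j-1) + pvMget mm 0 j))
        ((List.range' 1 R).foldl
          (fun os i => pvSet2 os i 0 (pvMget os (i-1) 0 + pvMget mm i 0))
          (pvSet2 (pvEtab (R+1) (C+1) (fun _ _ => (0:Int))) 0 0 (pvMget mm 0 0)))))
    = pvEtab (R+1) (C+1) (pvOpt mm) := by
  rw [pvSet2_Etab _ _ (by omega) (by omega), pvColPhase mm R C R (le_refl R)]
  have h1 : pvEtab (R+1) (C+1) (fun a b => if b = 0 ∧ a ≤ R then pvOpt mm a 0 else 0)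
      = pvEtab (R+1) (C+1) (fun a b => if b = 0 then pvOpt mm a 0 else 0) := by
    apply pvEtab_congr; intro a ha b hb
    by_cases hb0 : b = 0
    · rw [if_pos ⟨hb0, by omega⟩, if_pos hb0]
    · rw [if_neg (by omega), if_neg hb0]
  rw [h1, pvRowPhase mm R C C (le_refl C)]
  have h2 : pvEtab (R+1) (C+1) (fun a b =>
        if b = 0 then pvOpt mm a 0 else if a = 0 ∧ b ≤ C then pvOpt mm 0 b else 0)
      = pvEtab (R+1) (C+1) (fun a b => if a = 0 ∨ b = 0 then pvOpt mm a b else 0) := by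
    apply pvEtab_congr; intro a ha b hb
    by_cases hb0 : b = 0
    · subst hb0; rw [if_pos rfl, if_pos (Or.inr rfl)]
    · rw [if_neg hb0]
      by_cases ha0 : a = 0
      · subst ha0; rw [if_pos ⟨rfl, by omega⟩, if_pos (Or.inl rfl)]
      · rw [if_neg (by omega), if_neg (by omega)]
  rw [h2, pvMainPhase mm R C R (le_refl R)]
  apply pvEtab_congr; intro a ha b hb
  rw [if_pos (Or.inl (by omega))]

-- the reversed optimal path with down-label dn and right-label rn
def pvPathL (m : List (List Int)) (dn rn : String) : Nat → Nat → List String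
  | 0, 0 => []
  | 0, j+1 => rn :: pvPathL m dn rn 0 j
  | i+1, 0 => dn :: pvPathL m dn rn i 0
  | i+1, j+1 =>
    if pvOpt m i (j+1) > pvOpt m (i+1) j then dn :: pvPathL m dn rn i (j+1)
    else rn :: pvPathL m dn rn (i+1) j
termination_by i j => i + j
decreasing_by all_goals omega

theorem pvPathL_map (m : List (List Int)) (dn rn : String) (f : String → String) :
    ∀ (n i j : Nat), i + j = n → (pvPathL m dn rn i j).map f = pvPathL m (f dn) (f rn) i j := by
  intro n
  induction n with
  | zero =>
    intro i j h
    obtain ⟨rfl, rfl⟩ : i = 0 ∧ j = 0 := by omega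
    simp [pvPathL]
  | succ n ih =>
    intro i j h
    match i, j with
    | 0, j'+1 =>
      rw [pvPathL, pvPathL, List.map_cons, ih 0 j' (by omega)]
    | i'+1, 0 =>
      rw [pvPathL, pvPathL, List.map_cons, ih i' 0 (by omega)]
    | i'+1, j'+1 =>
      rw [pvPathL, pvPathL]
      by_cases hc : pvOpt m i' (j'+1) > pvOpt m (i'+1) j'
      · rw [if_pos hc, if_pos hc, List.map_cons, ih i' (j'+1) (by omega)]
      · rw [if_neg hc, if_neg hc, List.map_cons, ih (i'+1) j' (by omega)]

-- A's backward walk over the finished score table yields exactly the pvPathL path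
theorem pvWalkA_pathL (m : List (List Int)) (R C : Nat) :
    ∀ (n a b : Nat) (p : List String), a ≤ R → b ≤ C → a + b = n →
    pvWalkA (pvEtab (R+1) (C+1) (pvOpt m)) a b p = p ++ pvPathL m "d" "r" a b := by
  intro n
  induction n with
  | zero =>
    intro a b p ha hb hab
    obtain ⟨rfl, rfl⟩ : a = 0 ∧ b = 0 := by omega
    rw [pvWalkA]
    simp [pvPathL]
  | succ n ih =>
    intro a b p ha hb hab
    have hne : ¬ (a = 0 ∧ b = 0) := by omega
    rw [pvWalkA, if_neg hne]
    match a, b, hne with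
    | 0, b'+1, _ =>
      rw [if_neg (by omega), if_pos rfl]
      simp only [Nat.add_sub_cancel]
      rw [ih 0 b' _ (by omega) (by omega) (by omega)]
      rw [pvPathL]
      simp
    | a'+1, 0, _ =>
      rw [if_neg (by omega), if_neg (by omega)]
      simp only [Nat.add_sub_cancel]
      rw [ih a' 0 _ (by omega) (by omega) (by omega)]
      rw [pvPathL]
      simp
    | a'+1, b'+1, _ =>
      rw [if_pos (by omega)]
      rw [pvMget_Etab _ (by omega) (by omega), pvMget_Etab _ (by omega) (by omega)]
      simp only [Nat.add_sub_cancel]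
      rw [pvPathL]
      by_cases hgt : pvOpt m a' (b'+1) > pvOpt m (a'+1) b'
      · rw [if_pos hgt, if_pos hgt, ih a' (b'+1) _ (by omega) (by omega) (by omega)]
        simp
      · rw [if_neg hgt, if_neg hgt, ih (a'+1) b' _ (by omega) (by omega) (by omega)]
        simp

theorem pvMapRange_getLastD {α : Type} (n : Nat) (f : Nat → α) (d : α) :
    ((List.range (n+1)).map f).getLastD d = f n := by
  rw [List.range_succ, List.map_append]
  simp

theorem pvRange_map_getD {α : Type} (n : Nat) (f : Nat → α) (d : α) {j : Nat} (hj : j < n) :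
    ((List.range n).map f).getD j d = f j := by
  rw [List.getD_eq_getElem _ _ (by simpa using hj)]
  simp

-- B's first row carries exactly (pvOpt 0 j, pvPathL 0 j)
theorem pvBFirstRow_fold (m : List (List Int)) (dn rn : String) (k : Nat) :
    (List.range' 1 k).foldl
      (fun r j => r ++ [((r.getLastD (0, [])).1 + pvMget m 0 j, rn :: (r.getLastD (0, [])).2)])
      [(pvMget m 0 0, [])]
    = (List.range (k+1)).map (fun j => (pvOpt m 0 j, pvPathL m dn rn 0 j)) := by
  induction k with
  | zero => simp [pvOpt, pvPathL]
  | succ k ih =>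
    rw [List.range'_1_concat, List.foldl_append, ih]
    simp only [List.foldl_cons, List.foldl_nil]
    rw [pvMapRange_getLastD, List.range_succ (n := k+1), List.map_append]
    have h1 : 1 + k = k + 1 := by omega
    simp only [h1, List.map_cons, List.map_nil]
    congr 1
    rw [pvOpt, pvPathL]

-- one step of B's row pass carries exactly (pvOpt (i'+1) j, pvPathL (i'+1) j)
theorem pvBRowInner (m : List (List Int)) (dn rn : String) (i' C : Nat) (t : Nat) (ht : t ≤ C) :
    (List.range' 1 t).foldl
      (fun nw j =>
        if (((List.range (C+1)).map (fun j => (pvOpt m i' j, pvPathL m dn rn i' j))).getD j (0, [])).1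
            > (nw.getLastD (0, [])).1 then
          nw ++ [((((List.range (C+1)).map (fun j => (pvOpt m i' j, pvPathL m dn rn i' j))).getD j (0, [])).1
                  + pvMget m (i'+1) j,
                 dn :: (((List.range (C+1)).map (fun j => (pvOpt m i' j, pvPathL m dn rn i' j))).getD j (0, [])).2)]
        else
          nw ++ [((nw.getLastD (0, [])).1 + pvMget m (i'+1) j, rn :: (nw.getLastD (0, [])).2)])
      [(pvOpt m (i'+1) 0, pvPathL m dn rn (i'+1) 0)]
    = (List.range (t+1)).map (fun j => (pvOpt m (i'+1) j, pvPathL m dn rn (i'+1) j)) := by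
  induction t with
  | zero => simp
  | succ t ih =>
    rw [List.range'_1_concat, List.foldl_append, ih (by omega)]
    simp only [List.foldl_cons, List.foldl_nil]
    rw [pvRange_map_getD _ _ _ (by omega), pvMapRange_getLastD]
    have h1 : 1 + t = t + 1 := by omega
    rw [h1]
    rw [List.range_succ (n := t+1), List.map_append]
    simp only [List.map_cons, List.map_nil]
    by_cases hgt : pvOpt m i' (t+1) > pvOpt m (i'+1) t
    · rw [if_pos hgt]
      congr 1
      have ho : pvOpt m (i'+1) (t+1) = pvOpt m i' (t+1) + pvMget m (i'+1) (t+1) := by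
        rw [pvOpt, max_eq_left (le_of_lt hgt)]
      have hp : pvPathL m dn rn (i'+1) (t+1) = dn :: pvPathL m dn rn i' (t+1) := by
        rw [pvPathL, if_pos hgt]
      rw [ho, hp]
    · rw [if_neg hgt]
      congr 1
      have ho : pvOpt m (i'+1) (t+1) = pvOpt m (i'+1) t + pvMget m (i'+1) (t+1) := by
        rw [pvOpt, max_eq_right (by omega)]
      have hp : pvPathL m dn rn (i'+1) (t+1) = rn :: pvPathL m dn rn (i'+1) t := by
        rw [pvPathL, if_neg hgt]
      rw [ho, hp]

theorem pvBOuterL (m : List (List Int)) (dn rn : String) (C : Nat) (k : Nat) :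
    (List.range' 1 k).foldl
      (fun row i => pvBRowStep m dn rn row i (C+1))
      ((List.range (C+1)).map (fun j => (pvOpt m 0 j, pvPathL m dn rn 0 j)))
    = (List.range (C+1)).map (fun j => (pvOpt m k j, pvPathL m dn rn k j)) := by
  induction k with
  | zero => simp
  | succ k ih =>
    rw [List.range'_1_concat, List.foldl_append, ih]
    simp only [List.foldl_cons, List.foldl_nil]
    unfold pvBRowStep
    simp only [Nat.add_sub_cancel]
    rw [pvRange_map_getD _ _ _ (by omega)]
    have h1 : 1 + k = k + 1 := by omega
    rw [h1]
    have hinit : (pvOpt m k 0 + pvMget m (k+1) 0, dn :: pvPathL m dn rn k 0)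
        = (pvOpt m (k+1) 0, pvPathL m dn rn (k+1) 0) := by
      rw [pvOpt, pvPathL]
    rw [hinit]
    exact pvBRowInner m dn rn k C C (le_refl C)

theorem pvTraverseEq (R C : Nat) (f : Nat → Nat → Int) :
    pvTraverseMatrix (pvEtab (R+1) (C+1) f)
      = (pvOpt (pvEtab (R+1) (C+1) f) R C, pvPathL (pvEtab (R+1) (C+1) f) "d" "r" R C) := by
  unfold pvTraverseMatrix pvEtab
  simp only [List.length_map, List.length_range]
  rw [show ((((List.range (R+1)).map (fun i => (List.range (C+1)).map (fun j => f i j))).getD 0 []).length) = C+1 by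
    rw [pvRange_map_getD _ _ _ (by omega)]; simp]
  simp only [Nat.add_sub_cancel]
  rw [show ((List.range (R+1)).map (fun i => (List.range (C+1)).map (fun j => f i j))) = pvEtab (R+1) (C+1) f from rfl]
  rw [show ((List.range (R+1)).map (fun _ => (List.range (C+1)).map (fun _ => (0:Int)))) = pvEtab (R+1) (C+1) (fun _ _ => (0:Int)) from rfl]
  rw [pvAtable (pvEtab (R+1) (C+1) f) R C]
  refine Prod.ext ?_ ?_
  · exact pvMget_Etab _ (by omega) (by omega)
  · have := pvWalkA_pathL (pvEtab (R+1) (C+1) f) R C (R+C) R C [] (le_refl R) (le_refl C) rfl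
    simpa using this

theorem pvBestPath_eq (R C : Nat) (f : Nat → Nat → Int) (dn rn : String) :
    pvBestPath (pvEtab (R+1) (C+1) f) dn rn
      = (pvOpt (pvEtab (R+1) (C+1) f) R C, pvPathL (pvEtab (R+1) (C+1) f) dn rn R C) := by
  unfold pvBestPath pvBFirstRow
  set m := pvEtab (R+1) (C+1) f with hm
  have hlen : m.length = R+1 := by rw [hm]; unfold pvEtab; simp
  have hlen0 : (m.getD 0 []).length = C+1 := by
    rw [hm, pvGetRow_Etab f (by omega)]; simp
  rw [hlen, hlen0]
  simp only [Nat.add_sub_cancel]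
  rw [pvBFirstRow_fold m dn rn C, pvBOuterL m dn rn C R, pvMapRange_getLastD]

-- A's first-match-of-max selection equals B's running strict-max over the tail
theorem pvSelect (s1 s2 s3 s4 : Int) (p1 p2 p3 p4 : List String) :
    (if max s1 (max s2 (max s3 s4)) = s1 then p1
     else if max s1 (max s2 (max s3 s4)) = s2 then p2
     else if max s1 (max s2 (max s3 s4)) = s3 then p3
     else if max s1 (max s2 (max s3 s4)) = s4 then p4
     else [])
    = (([(s2,p2),(s3,p3),(s4,p4)] : List (Int × List String)).foldl
        (fun best r => if r.1 > best.1 then r else best) (s1,p1)).2 := by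
  simp only [List.foldl_cons, List.foldl_nil]
  by_cases h2 : s2 > s1
  · rw [if_pos (show (s2,p2).1 > (s1,p1).1 from h2)]
    by_cases h3 : s3 > s2
    · rw [if_pos (show (s3,p3).1 > (s2,p2).1 from h3)]
      by_cases h4 : s4 > s3
      · rw [if_pos (show (s4,p4).1 > (s3,p3).1 from h4)]
        show _ = p4
        split_ifs <;> first | rfl | omega
      · rw [if_neg (show ¬((s4,p4).1 > (s3,p3).1) from h4)]
        show _ = p3
        split_ifs <;> first | rfl | omega
    · rw [if_neg (show ¬((s3,p3).1 > (s2,p2).1) from h3)]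
      by_cases h4 : s4 > s2
      · rw [if_pos (show (s4,p4).1 > (s2,p2).1 from h4)]
        show _ = p4
        split_ifs <;> first | rfl | omega
      · rw [if_neg (show ¬((s4,p4).1 > (s2,p2).1) from h4)]
        show _ = p2
        split_ifs <;> first | rfl | omega
  · rw [if_neg (show ¬((s2,p2).1 > (s1,p1).1) from h2)]
    by_cases h3 : s3 > s1
    · rw [if_pos (show (s3,p3).1 > (s1,p1).1 from h3)]
      by_cases h4 : s4 > s3
      · rw [if_pos (show (s4,p4).1 > (s3,p3).1 from h4)]
        show _ = p4
        split_ifs <;> first | rfl | omega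
      · rw [if_neg (show ¬((s4,p4).1 > (s3,p3).1) from h4)]
        show _ = p3
        split_ifs <;> first | rfl | omega
    · rw [if_neg (show ¬((s3,p3).1 > (s1,p1).1) from h3)]
      by_cases h4 : s4 > s1
      · rw [if_pos (show (s4,p4).1 > (s1,p1).1 from h4)]
        show _ = p4
        split_ifs <;> first | rfl | omega
      · rw [if_neg (show ¬((s4,p4).1 > (s1,p1).1) from h4)]
        show _ = p1
        split_ifs <;> first | rfl | omega

theorem pvPathL_map2 (m : List (List Int)) (i j : Nat) :
    (pvPathL m "d" "r" i j).map (fun s => if s = "r" then "l" else s) = pvPathL m "d" "l" i j := by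
  have := pvPathL_map m "d" "r" (fun s => if s = "r" then "l" else s) (i+j) i j rfl
  simpa using this

theorem pvPathL_map3 (m : List (List Int)) (i j : Nat) :
    (pvPathL m "d" "r" i j).map (fun s => let s := if s = "r" then "l" else s; if s = "d" then "u" else s)
      = pvPathL m "u" "l" i j := by
  have := pvPathL_map m "d" "r" (fun s => let s := if s = "r" then "l" else s; if s = "d" then "u" else s)
    (i+j) i j rfl
  simpa using this

theorem pvPathL_map4 (m : List (List Int)) (i j : Nat) :
    (pvPathL m "d" "r" i j).map (fun s => if s = "d" then "u" else s) = pvPathL m "u" "r" i j := by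
  have := pvPathL_map m "d" "r" (fun s => if s = "d" then "u" else s) (i+j) i j rfl
  simpa using this

theorem pvTop (matrix : List (List Int)) : max_traverse matrix = max_traverse_alt matrix := by
  simp only [max_traverse, max_traverse_alt, List.foldl_cons, List.foldl_nil,
    List.nil_append, List.cons_append, List.headD_cons, List.drop_succ_cons, List.drop_zero]
  rw [pvTraverseEq, pvTraverseEq, pvTraverseEq, pvTraverseEq,
      pvBestPath_eq, pvBestPath_eq, pvBestPath_eq, pvBestPath_eq]
  rw [pvPathL_map2, pvPathL_map3, pvPathL_map4]
  rw [pvSelect]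
  simp

-- ===== VERDICT (by name: the statement is the Claim_ definition above) =====
theorem max_traverse_spec : Claim_equal_max_traverse := by
  intro matrix _dom _pre
  unfold Spec_max_traverse
  exact pvTop matrix
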